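-- pv_equiv track=rewrite | github.com/Annacaro22/6120HWs | LICM.py | domtree
-- ===== SOURCE A (Python) =====
-- def domtree(domlevel, cfg):
--     reverse = cfgreverse(cfg)
--     tree = {}
--     for starter in cfg.keys():
--         if starter not in reverse.keys(): #AKA has no preds AKA is a starter block
--             tree[starter] = []
--     oldtree = None
--     while oldtree != tree:
--         oldtree = tree
--         for vertex in (list(cfg.keys()) + ['end']):
--             if vertex in reverse.keys() and reverse[vertex] is not None: #AKA has some pred AKA not a starter block
--                 currdomlevels = domlevel[vertex]
--                 keysonly = list(currdomlevels.keys())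
--
--                 newkeys = []
--                 for num in keysonly:
--                     if num != 0:
--                         newkeys.append(num)
--
--                 if (newkeys) is not None and newkeys != []:
--                     immdomindex = min(newkeys)
--                     immdom = currdomlevels[immdomindex]
--                     if immdom in tree.keys() and tree[immdom] is not None and tree[immdom] != []:
--                         tree[immdom].append(vertex)
--                     else:
--                         tree[immdom] = [vertex]
--     return tree
--
-- def cfgreverse(cfg):
--     reverse = {}
--     for block in list(cfg.keys()):
--         for succ in cfg[block]:
--             if succ in list(reverse.keys()):
--                 reverse[succ] = reverse[succ] + [block]
--             else:
--                 reverse[succ] = [block]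
--     return reverse
-- ===== SOURCE B (Python) =====
-- def domtree(domlevel, cfg):
--     # Transposed construction: instead of appending each vertex into a mutated dict,
--     # first determine the tree's key order, then build each key's child list by
--     # filtering the vertex sequence.
--     order = list(cfg.keys()) + ['end']
--     preds = {s for succs in cfg.values() for s in succs}
--
--     def parent(v):
--         if v in preds:
--             ks = [k for k in domlevel[v] if k != 0]
--             if ks:
--                 return domlevel[v][min(ks)]
--         return None
--
--     keyorder = [s for s in cfg if s not in preds]
--     for v in order:
--         p = parent(v)
--         if p is not None and p not in keyorder:
--             keyorder.append(p)
--     return {p: [v for v in order if parent(v) == p] for p in keyorder}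
-- ===== Notes on version B (the rewrite author's own statement) =====
-- stated objective: alternative
-- what changed: A incrementally mutates a dict, appending each vertex to its immediate dominator's child list inside a while-'fixpoint' (which the aliasing oldtree = tree makes run exactly once) over a cfgreverse predecessor-list dict; B transposes the construction: it computes a parent function from a successor set, first determines the tree's key order (starters, then parents in first-child order), and then builds each key's child list in one go by filtering the vertex sequence — no dict mutation and no reverse map; …
import Mathlib
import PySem

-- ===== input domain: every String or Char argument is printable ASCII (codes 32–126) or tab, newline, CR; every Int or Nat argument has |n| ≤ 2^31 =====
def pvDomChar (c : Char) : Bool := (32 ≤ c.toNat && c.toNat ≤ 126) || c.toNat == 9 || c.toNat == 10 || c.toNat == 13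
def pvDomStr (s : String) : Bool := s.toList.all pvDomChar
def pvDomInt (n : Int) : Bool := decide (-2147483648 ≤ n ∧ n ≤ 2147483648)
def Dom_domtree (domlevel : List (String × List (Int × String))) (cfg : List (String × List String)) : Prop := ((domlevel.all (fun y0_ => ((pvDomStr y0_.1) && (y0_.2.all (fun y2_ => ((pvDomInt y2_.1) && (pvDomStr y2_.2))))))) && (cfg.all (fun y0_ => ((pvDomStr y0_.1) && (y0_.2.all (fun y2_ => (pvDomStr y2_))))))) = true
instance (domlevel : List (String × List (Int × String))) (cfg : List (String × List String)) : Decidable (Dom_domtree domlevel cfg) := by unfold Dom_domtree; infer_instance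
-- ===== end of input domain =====

-- B transposes A's construction: instead of mutating a dict vertex by vertex (inside A's
-- one-shot while and cfgreverse predecessor map), it computes the tree's key order first
-- and then builds each key's child list by filtering the vertex sequence. Objective:
-- alternative decomposition; return-value equivalence only.

-- ===== PORT A =====
-- literal port of cfgreverse: dict of predecessor lists keyed by successor
def cfgreverse (cfg : List (String × List String)) : PySem.Dict String (List String) :=
  (cfg.map Prod.fst).foldl (fun reverse block =>
    ((PySem.Dict.mk cfg).getD block []).foldl (fun reverse succ =>
      if reverse.contains succ then
        reverse.insert succ (reverse.getD succ [] ++ [block])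
      else
        reverse.insert succ [block]) reverse) PySem.Dict.empty

def domtree (domlevel : List (String × List (Int × String))) (cfg : List (String × List String)) : List (String × List String) :=
  let reverse := cfgreverse cfg
  let tree : PySem.Dict String (List String) :=
    (cfg.map Prod.fst).foldl (fun tree starter =>
      if reverse.contains starter then tree else tree.insert starter []) PySem.Dict.empty
  -- Python's `oldtree = tree` ALIASES the dict, so after one iteration `oldtree != tree` is
  -- False: the while body executes exactly once; we port that single execution.
  let tree :=
    (cfg.map Prod.fst ++ ["end"]).foldl (fun tree vertex =>
      -- `reverse[vertex] is not None` is always true (values are lists): membership suffices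
      if reverse.contains vertex then
        let currdomlevels := PySem.Dict.mk ((PySem.Dict.mk domlevel).getD vertex [])
        let keysonly := currdomlevels.keys
        let newkeys := keysonly.filter (fun num => num != 0)
        if newkeys ≠ [] then
          let immdomindex := (PySem.List.min? newkeys (fun x => x)).getD 0
          let immdom := currdomlevels.getD immdomindex ""
          if tree.contains immdom ∧ tree.getD immdom [] ≠ [] then
            tree.insert immdom (tree.getD immdom [] ++ [vertex])
          else
            tree.insert immdom [vertex]
        else tree
      else tree) tree
  tree.items

-- ===== PORT B =====
-- Source B's nested helper `parent(v)`
def pvParent (domlevel : List (String × List (Int × String))) (preds : PySem.Set String)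
    (v : String) : Option String :=
  if preds.contains v then
    let ks := (PySem.Dict.mk ((PySem.Dict.mk domlevel).getD v [])).keys.filter (fun k => k != 0)
    if ks ≠ [] then
      some ((PySem.Dict.mk ((PySem.Dict.mk domlevel).getD v [])).getD
        ((PySem.List.min? ks (fun x => x)).getD 0) "")
    else none
  else none

def domtree_alt (domlevel : List (String × List (Int × String))) (cfg : List (String × List String)) : List (String × List String) :=
  let order := cfg.map Prod.fst ++ ["end"]
  let preds : PySem.Set String := cfg.foldl (fun s p => PySem.Set.update s p.2) PySem.Set.empty
  let keyorder0 := (cfg.map Prod.fst).filter (fun s => !(preds.contains s))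
  let keyorder := order.foldl (fun ko v =>
      match pvParent domlevel preds v with
      | some p => if p ∈ ko then ko else ko ++ [p]
      | none => ko) keyorder0
  keyorder.map (fun p => (p, order.filter (fun v => pvParent domlevel preds v == some p)))

-- ===== PRECONDITION & SPEC =====
-- Pre_ excludes (a) association lists whose cfg keys are not distinct — no Python dict produces
-- them — and (b) inputs on which A raises KeyError because some vertex that has a predecessor
-- has no entry in domlevel (B raises the same KeyError there).
def Pre_domtree (domlevel : List (String × List (Int × String))) (cfg : List (String × List String)) : Prop :=
  (cfg.map Prod.fst).Nodup ∧
  ∀ v ∈ cfg.map Prod.fst ++ ["end"], (∃ p ∈ cfg, v ∈ p.2) → v ∈ domlevel.map Prod.fst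
instance (domlevel : List (String × List (Int × String))) (cfg : List (String × List String)) : Decidable (Pre_domtree domlevel cfg) := by unfold Pre_domtree; infer_instance

def pvWitness_domtree : (List (String × List (Int × String))) × (List (String × List String)) :=
  ([("b", [(0, "b"), (1, "a")]), ("a", [(0, "a")])], [("a", ["b"]), ("b", [])])

def Spec_domtree (domlevel : List (String × List (Int × String))) (cfg : List (String × List String)) (out : List (String × List String)) : Prop := out = domtree_alt domlevel cfg
instance (domlevel : List (String × List (Int × String))) (cfg : List (String × List String)) (out : List (String × List String)) : Decidable (Spec_domtree domlevel cfg out) := by unfold Spec_domtree; infer_instance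

-- ===== CLAIM (what is proved, stated in full; the proofs are below) =====
def Claim_equal_domtree : Prop := ∀ (domlevel : List (String × List (Int × String))) (cfg : List (String × List String)), Dom_domtree domlevel cfg → Pre_domtree domlevel cfg → Spec_domtree domlevel cfg (domtree domlevel cfg)

-- ===== LEMMAS AND PROOFS =====

-- the successor set B computes
def pvPreds (cfg : List (String × List String)) : PySem.Set String :=
  cfg.foldl (fun preds p => PySem.Set.update preds p.2) PySem.Set.empty

-- cfgreverse's inner loop always inserts at succ: its keys evolve as Set.update
theorem keys_inner (block : String) (succs : List String) (d : PySem.Dict String (List String)) :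
    (succs.foldl (fun reverse succ =>
        if reverse.contains succ then
          reverse.insert succ (reverse.getD succ [] ++ [block])
        else
          reverse.insert succ [block]) d).keys = PySem.Set.update d.keys succs := by
  rw [PySem.List.foldl_congr_mem' succs _
      (fun reverse succ => reverse.insert succ
        (if reverse.contains succ then reverse.getD succ [] ++ [block] else [block])) d
      (by intro x _ acc; by_cases h : acc.contains x = true <;> simp [h])]
  exact PySem.Dict.keys_foldl_insert succs _ d

theorem keys_rev_gen (l : List (String × List String)) (d : PySem.Dict String (List String))
    (s : PySem.Set String) (h : d.keys = s) :
    (l.foldl (fun d p => p.2.foldl (fun reverse succ =>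
        if reverse.contains succ then
          reverse.insert succ (reverse.getD succ [] ++ [p.1])
        else
          reverse.insert succ [p.1]) d) d).keys = l.foldl (fun s p => PySem.Set.update s p.2) s := by
  induction l generalizing d s with
  | nil => simpa using h
  | cons a t ih =>
    simp only [List.foldl_cons]
    exact ih _ _ (by rw [keys_inner, h])

-- under Nodup keys, cfg[block] looked up during cfgreverse's iteration is the pair's own list,
-- so cfgreverse's key list is exactly B's successor set
theorem keys_cfgreverse (cfg : List (String × List String)) (h : (cfg.map Prod.fst).Nodup) :
    (cfgreverse cfg).keys = pvPreds cfg := by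
  unfold cfgreverse pvPreds
  rw [List.foldl_map]
  rw [PySem.List.foldl_congr_mem' cfg _
      (fun d p => p.2.foldl (fun reverse succ =>
        if reverse.contains succ then
          reverse.insert succ (reverse.getD succ [] ++ [p.1])
        else
          reverse.insert succ [p.1]) d) PySem.Dict.empty
      (by
        intro p hp acc
        have hpv : (PySem.Dict.mk cfg).getD p.1 [] = p.2 :=
          PySem.Dict.getD_of_mem_items (PySem.Dict.mk cfg) (by exact hp) h []
        rw [hpv])]
  exact keys_rev_gen cfg PySem.Dict.empty PySem.Set.empty rfl

theorem contains_cfgreverse (cfg : List (String × List String))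
    (h : (cfg.map Prod.fst).Nodup) (x : String) :
    (cfgreverse cfg).contains x = (pvPreds cfg).contains x := by
  rw [PySem.Dict.contains_eq_decide_mem_keys, keys_cfgreverse cfg h]
  simp [PySem.Set.contains, List.contains_eq_mem]

-- a fold that inserts (val s) at fresh keys under a per-key condition appends the surviving pairs
theorem items_foldl_insert_if_fresh {ν : Type} (c : String → Bool) (val : String → ν) :
    ∀ (l : List String) (d : PySem.Dict String ν), l.Nodup →
      (∀ s ∈ l, d.contains s = false) →
      (l.foldl (fun t s => if c s then t else t.insert s (val s)) d).items =
        d.items ++ (l.filter (fun s => !(c s))).map (fun s => (s, val s)) := by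
  intro l
  induction l with
  | nil => simp
  | cons a t ih =>
    intro d hnd hfr
    simp only [List.foldl_cons, List.filter_cons]
    by_cases hc : c a = true
    · simp only [hc, if_true, Bool.not_true, Bool.false_eq_true, if_false]
      exact ih d hnd.of_cons (fun s hs => hfr s (List.mem_cons_of_mem a hs))
    · rw [if_neg hc]
      have hca : c a = false := by simpa using hc
      rw [ih (d.insert a (val a)) hnd.of_cons
          (fun s hs => by
            rw [PySem.Dict.contains_insert]
            have hne : s ≠ a := fun he => (List.nodup_cons.mp hnd).1 (he ▸ hs)
            simp [hne, hfr s (List.mem_cons_of_mem a hs)])]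
      rw [PySem.Dict.items_insert_of_not_contains _ _ (hfr a List.mem_cons_self)]
      simp [hca]

-- THE KEY LEMMA: the per-vertex "append child into the dict" loop produces, as items, exactly
-- B's key order paired with the filtered child lists
theorem grp_items (par : String → Option String) :
    ∀ (l : List String) (t : PySem.Dict String (List String)), t.keys.Nodup →
      (l.foldl (fun t v => match par v with
          | some p => t.insert p (t.getD p [] ++ [v])
          | none => t) t).items =
        (l.foldl (fun ko v => match par v with
            | some p => if p ∈ ko then ko else ko ++ [p]
            | none => ko) t.keys).map
          (fun p => (p, t.getD p [] ++ l.filter (fun v => par v == some p))) := by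
  intro l
  induction l with
  | nil =>
    intro t hnd
    simpa using PySem.Dict.items_eq_map_keys t hnd []
  | cons v rest ih =>
    intro t hnd
    simp only [List.foldl_cons]
    cases hp : par v with
    | none =>
      rw [ih t hnd]
      congr 1
      funext p
      simp [hp]
    | some p =>
      have hset : (t.insert p (t.getD p [] ++ [v])).keys =
          if p ∈ t.keys then t.keys else t.keys ++ [p] := by
        by_cases hm : p ∈ t.keys
        · rw [PySem.Dict.keys_insert_of_contains]
          · simp [hm]
          · rw [PySem.Dict.contains_eq_decide_mem_keys]; simpa
        · rw [PySem.Dict.keys_insert_of_not_contains]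
          · simp [hm]
          · rw [PySem.Dict.contains_eq_decide_mem_keys]; simpa
      have hnd' : (t.insert p (t.getD p [] ++ [v])).keys.Nodup := by
        rw [hset]; split_ifs with hm
        · exact hnd
        · exact List.Nodup.append hnd (List.nodup_singleton p)
            (by simpa [List.disjoint_singleton] using hm)
      rw [ih _ hnd', hset]
      congr 1
      funext q
      by_cases hq : q = p
      · subst hq
        rw [PySem.Dict.getD_insert_self]
        simp [hp]
      · rw [PySem.Dict.getD_insert_of_ne _ _ _ hq]
        have hne : (some p == some q) = false := by
          simp only [beq_eq_false_iff_ne, ne_eq, Option.some.injEq]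
          exact fun h => hq h.symm
        simp [hp, hne]

-- A's per-vertex step, with `reverse.contains` already rewritten to the successor set, IS the
-- grouping step driven by pvParent (the insert-[v] branch coincides when the slot is [] or absent)
theorem stepA_eq (domlevel : List (String × List (Int × String))) (cfg : List (String × List String))
    (tree : PySem.Dict String (List String)) (vertex : String) :
    (if (pvPreds cfg).contains vertex then
        let currdomlevels := PySem.Dict.mk ((PySem.Dict.mk domlevel).getD vertex [])
        let keysonly := currdomlevels.keys
        let newkeys := keysonly.filter (fun num => num != 0)
        if newkeys ≠ [] then
          let immdomindex := (PySem.List.min? newkeys (fun x => x)).getD 0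
          let immdom := currdomlevels.getD immdomindex ""
          if tree.contains immdom ∧ tree.getD immdom [] ≠ [] then
            tree.insert immdom (tree.getD immdom [] ++ [vertex])
          else
            tree.insert immdom [vertex]
        else tree
      else tree) =
      (match pvParent domlevel (pvPreds cfg) vertex with
        | some p => tree.insert p (tree.getD p [] ++ [vertex])
        | none => tree) := by
  unfold pvParent
  simp only [PySem.Dict.keys]
  by_cases h1 : (pvPreds cfg).contains vertex = true
  · simp only [h1, if_true]
    by_cases h2 : ((PySem.Dict.mk ((PySem.Dict.mk domlevel).getD vertex [])).items.map Prod.fst).filter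
        (fun k => k != 0) = []
    · simp [h2]
    · simp only [h2, ne_eq, not_false_eq_true, if_true]
      set p := (PySem.Dict.mk ((PySem.Dict.mk domlevel).getD vertex [])).getD
        ((PySem.List.min? (((PySem.Dict.mk ((PySem.Dict.mk domlevel).getD vertex [])).items.map Prod.fst).filter
          (fun k => k != 0)) (fun x => x)).getD 0) "" with hp
      by_cases h3 : tree.contains p = true ∧ tree.getD p [] ≠ []
      · simp [h3]
      · simp only [h3, if_false]
        have : tree.getD p [] = [] := by
          by_cases hc : tree.contains p = true
          · by_cases he : tree.getD p [] = []
            · exact he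
            · exact absurd ⟨hc, he⟩ h3
          · exact PySem.Dict.getD_of_not_contains _ _ (by simpa using hc)
        rw [this]
        simp
  · have h1' : vertex ∉ pvPreds cfg := by simpa [PySem.Set.contains_iff] using h1
    simp [h1']

-- ===== VERDICT (by name: the statement is the Claim_ definition above) =====
theorem domtree_spec : Claim_equal_domtree := by
  intro domlevel cfg _ hpre
  obtain ⟨hnd, -⟩ := hpre
  unfold Spec_domtree domtree domtree_alt
  simp only [contains_cfgreverse cfg hnd]
  -- starter initialisation: its items / keys / lookups
  have hfr : ∀ s ∈ cfg.map Prod.fst,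
      (PySem.Dict.empty : PySem.Dict String (List String)).contains s = false := by
    intro s _; exact PySem.Dict.contains_empty s
  have h0 := items_foldl_insert_if_fresh (fun s => (pvPreds cfg).contains s)
      (fun _ => ([] : List String)) (cfg.map Prod.fst) PySem.Dict.empty hnd hfr
  set tree0 := (cfg.map Prod.fst).foldl
      (fun t s => if (pvPreds cfg).contains s then t else t.insert s ([] : List String))
      PySem.Dict.empty with htree0
  simp only [PySem.Dict.empty, List.nil_append] at h0
  have hkeys0 : tree0.keys = (cfg.map Prod.fst).filter (fun s => !((pvPreds cfg).contains s)) := by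
    show tree0.items.map Prod.fst = _
    rw [h0, List.map_map]
    simp [Function.comp_def]
  have hnd0 : tree0.keys.Nodup := by
    rw [hkeys0]; exact hnd.filter _
  have hget0 : ∀ p, tree0.getD p [] = [] := by
    intro p
    by_cases hm : p ∈ tree0.keys
    · have hmem : (p, ([] : List String)) ∈ tree0.items := by
        rw [h0, List.mem_map]
        rw [hkeys0] at hm
        exact ⟨p, hm, rfl⟩
      exact PySem.Dict.getD_of_mem_items tree0 hmem hnd0 []
    · exact PySem.Dict.getD_of_not_contains _ _ (by
        rw [PySem.Dict.contains_eq_decide_mem_keys]; simpa)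
  -- rewrite A's main loop step into the pvParent grouping step
  rw [PySem.List.foldl_congr_mem' (cfg.map Prod.fst ++ ["end"]) _
      (fun tree v => match pvParent domlevel (pvPreds cfg) v with
        | some p => tree.insert p (tree.getD p [] ++ [v])
        | none => tree) tree0
      (fun v _ tree => stepA_eq domlevel cfg tree v)]
  rw [grp_items (pvParent domlevel (pvPreds cfg)) (cfg.map Prod.fst ++ ["end"]) tree0 hnd0]
  rw [hkeys0]
  show _ = List.map _ _
  congr 1
  funext p
  rw [hget0 p]
  simp [pvPreds]
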